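-- pv_equiv track=rewrite | github.com/dubsidiya/checkbrain | desh/ege2026kp/14solve/14-490.py | f
-- ===== SOURCE A (Python) =====
-- def f( n ):
--     cnt5 = cnt3 = 0
--     while n != 0:
--         if n%6 == 3:
--             cnt3 += 1
--         if n%6 == 5:
--             cnt5 += 1
--         n //= 6
--     return (cnt3 == cnt5)
-- ===== SOURCE B (Python) =====
-- def f(n):
--     def balance(m):
--         if m == 0:
--             return 0
--         return (m % 6 == 3) - (m % 6 == 5) + balance(m // 6)
--     return balance(n) == 0
-- ===== Notes on version B (the rewrite author's own statement) =====
-- stated objective: alternative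
-- what changed: A's iterative loop maintaining two separate counters compared at the end is replaced by a recursive function computing a single signed balance (+1 per base-6 digit 3, -1 per digit 5) whose final value decides the answer.
import Mathlib
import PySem

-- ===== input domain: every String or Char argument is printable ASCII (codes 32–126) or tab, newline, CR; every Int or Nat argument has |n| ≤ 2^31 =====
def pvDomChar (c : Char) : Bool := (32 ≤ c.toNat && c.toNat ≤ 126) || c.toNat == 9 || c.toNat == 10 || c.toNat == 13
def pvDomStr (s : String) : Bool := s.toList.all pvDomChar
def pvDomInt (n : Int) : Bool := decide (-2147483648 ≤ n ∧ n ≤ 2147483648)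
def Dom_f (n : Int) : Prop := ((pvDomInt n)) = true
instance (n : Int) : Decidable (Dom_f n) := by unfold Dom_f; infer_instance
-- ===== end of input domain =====

-- B replaces A's iterative two-counter loop by a recursive single signed-balance computation whose final value decides the answer; objective: alternative.


-- ===== PORT A =====
-- A's while-loop: two counters updated per iteration, n //= 6. For n ≥ 0 (Pre_f)
-- Python's n%6 and n//6 coincide with Nat's % and /; recursion on the Nat value.
def fGo (n : Nat) (cnt3 cnt5 : Int) : Bool :=
  if n = 0 then cnt3 == cnt5
  else fGo (n / 6)
        (if n % 6 = 3 then cnt3 + 1 else cnt3)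
        (if n % 6 = 5 then cnt5 + 1 else cnt5)
decreasing_by exact Nat.div_lt_self (Nat.pos_of_ne_zero (by assumption)) (by norm_num)

def f (n : Int) : Bool := fGo n.toNat 0 0

-- ===== PORT B =====
-- B's recursive helper: signed balance (+1 per base-6 digit 3, -1 per digit 5).
def balance (m : Nat) : Int :=
  if m = 0 then 0
  else (if m % 6 = 3 then (1 : Int) else 0) - (if m % 6 = 5 then (1 : Int) else 0)
       + balance (m / 6)
decreasing_by exact Nat.div_lt_self (Nat.pos_of_ne_zero (by assumption)) (by norm_num)

-- On n < 0 Python B's recursion never returns (RecursionError); those inputs are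
-- outside Pre_f, and the port returns the junk value 'false' there (totality guard).
def f_alt (n : Int) : Bool := if n < 0 then false else balance n.toNat == 0

-- ===== PRECONDITION & SPEC =====
-- Pre_f excludes n < 0, on which A's 'while n != 0' never terminates and B's recursion raises (neither returns a value).
def Pre_f (n : Int) : Prop := 0 ≤ n
instance (n : Int) : Decidable (Pre_f n) := by unfold Pre_f; infer_instance
def pvWitness_f : Int := 33

def Spec_f (n : Int) (out : Bool) : Prop := out = f_alt n
instance (n : Int) (out : Bool) : Decidable (Spec_f n out) := by unfold Spec_f; infer_instance

-- ===== CLAIM (what is proved, stated in full; the proofs are below) =====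
def Claim_equal_f : Prop := ∀ (n : Int), Dom_f n → Pre_f n → Spec_f n (f n)

-- ===== LEMMAS AND PROOFS =====
lemma fGo_balance (n : Nat) : ∀ (c3 c5 : Int),
    fGo n c3 c5 = ((c3 - c5) + balance n == 0) := by
  induction n using Nat.strong_induction_on with
  | _ n ih =>
    intro c3 c5
    rw [fGo, balance]
    by_cases h : n = 0
    · simp [h]
      constructor <;> intro <;> omega
    · have := ih (n / 6) (Nat.div_lt_self (Nat.pos_of_ne_zero h) (by norm_num))
      simp only [h, if_false]
      rw [this]
      rcases Decidable.em (n % 6 = 3) with h3 | h3 <;>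
      rcases Decidable.em (n % 6 = 5) with h5 | h5 <;>
        simp_all <;> constructor <;> intro <;> omega

-- ===== VERDICT (by name: the statement is the Claim_ definition above) =====
theorem f_spec : Claim_equal_f := by
  intro n _ hn
  unfold Spec_f f f_alt
  rw [if_neg (by exact not_lt.mpr hn), fGo_balance]
  norm_num
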